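-- pv_equiv track=rewrite | github.com/greenstick/NSB | assignments/project/markov-pipeline.py | generateUnionSubgraph
-- ===== SOURCE A (Python) =====
-- def generateUnionSubgraph (edgeList, nodes):
-- 	"""
-- 	Generate subgraph from edges with at least one nodes in node list
-- 	@params:
-- 		edgeList 			- Required 	: (List, Set)
-- 		nodes				- Required 	: (List, Set)
-- 	"""
-- 	componentEdges = set()
-- 	componentNodes = set()
-- 	for a, b in edgeList:
-- 		if a == b:
-- 			continue
-- 		for node in nodes:
-- 			if a == node or b == node:
-- 				componentNodes.add(a), componentNodes.add(b)
-- 				componentEdges.add((a, b))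
-- 	return componentEdges, componentNodes
-- ===== SOURCE B (Python) =====
-- def generateUnionSubgraph (edgeList, nodes):
-- 	"""
-- 	Generate subgraph from edges with at least one nodes in node list
-- 	(inverted-index formulation)
-- 	"""
-- 	edges = list(edgeList)
-- 	# pass 1: inverted index endpoint -> indices of the non-loop edges touching it
-- 	incident = {}
-- 	for i, (a, b) in enumerate(edges):
-- 		if a != b:
-- 			incident.setdefault(a, []).append(i)
-- 			incident.setdefault(b, []).append(i)
-- 	# pass 2: union of the postings lists of the query nodes
-- 	hit = set()
-- 	for node in nodes:
-- 		hit.update(incident.get(node, []))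
-- 	# pass 3: emit the selected edges (and their endpoints) in original order
-- 	componentEdges = set()
-- 	componentNodes = set()
-- 	for i, (a, b) in enumerate(edges):
-- 		if i in hit:
-- 			componentEdges.add((a, b))
-- 			componentNodes.add(a)
-- 			componentNodes.add(b)
-- 	return componentEdges, componentNodes
-- ===== Notes on version B (the rewrite author's own statement) =====
-- stated objective: faster
-- what changed: Replaces A's per-edge scan of the node list with an inverted index (dict endpoint -> edge indices) built once, whose postings lists for the query nodes are unioned into a set of edge indices; the selected edges and their endpoints are then emitted in a final pass over the indexed edges.
import Mathlib
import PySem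

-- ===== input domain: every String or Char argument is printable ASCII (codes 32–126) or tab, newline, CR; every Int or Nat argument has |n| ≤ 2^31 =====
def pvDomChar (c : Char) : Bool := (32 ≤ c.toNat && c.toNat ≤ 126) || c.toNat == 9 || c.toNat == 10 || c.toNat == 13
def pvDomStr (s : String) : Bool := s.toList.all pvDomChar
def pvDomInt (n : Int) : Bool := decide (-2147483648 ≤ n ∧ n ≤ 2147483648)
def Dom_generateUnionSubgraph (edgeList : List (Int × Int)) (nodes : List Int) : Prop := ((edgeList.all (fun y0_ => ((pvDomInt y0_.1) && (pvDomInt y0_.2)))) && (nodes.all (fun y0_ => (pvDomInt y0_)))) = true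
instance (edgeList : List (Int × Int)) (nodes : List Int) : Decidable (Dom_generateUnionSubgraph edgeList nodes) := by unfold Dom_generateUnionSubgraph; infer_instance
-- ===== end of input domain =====

-- B replaces A's per-edge scan of the node list by an inverted index endpoint -> edge indices
-- built once; the query nodes' postings lists are unioned into an index set and the selected
-- edges (and their endpoints) are emitted in a final pass in original order.


-- ===== PORT A =====
def generateUnionSubgraph (edgeList : List (Int × Int)) (nodes : List Int) : (List (Int × Int)) × List Int :=
  let st := edgeList.foldl
    (fun (st : PySem.Set (Int × Int) × PySem.Set Int) e =>
      if e.1 == e.2 then st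
      else
        nodes.foldl
          (fun (st : PySem.Set (Int × Int) × PySem.Set Int) node =>
            if e.1 == node || e.2 == node then
              (PySem.Set.add st.1 (e.1, e.2), PySem.Set.add (PySem.Set.add st.2 e.1) e.2)
            else st)
          st)
    (PySem.Set.empty, PySem.Set.empty)
  (st.1, st.2)

-- ===== PORT B =====
def generateUnionSubgraph_alt (edgeList : List (Int × Int)) (nodes : List Int) : (List (Int × Int)) × List Int :=
  -- pass 1: inverted index endpoint -> indices of the non-loop edges touching it
  let incident : PySem.Dict Int (List Int) :=
    (PySem.List.enumerate edgeList 0).foldl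
      (fun d p =>
        if p.2.1 != p.2.2 then
          (PySem.Dict.modify d p.2.1 [] (· ++ [p.1])).modify p.2.2 [] (· ++ [p.1])
        else d)
      PySem.Dict.empty
  -- pass 2: union of the postings lists of the query nodes
  let hit : PySem.Set Int :=
    nodes.foldl (fun s node => (incident.getD node []).foldl PySem.Set.add s) PySem.Set.empty
  -- pass 3: emit the selected edges (and their endpoints) in original order
  let fin := (PySem.List.enumerate edgeList 0).foldl
    (fun (st : PySem.Set (Int × Int) × PySem.Set Int) p =>
      if PySem.Set.contains hit p.1 then
        (PySem.Set.add st.1 (p.2.1, p.2.2), PySem.Set.add (PySem.Set.add st.2 p.2.1) p.2.2)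
      else st)
    (PySem.Set.empty, PySem.Set.empty)
  (fin.1, fin.2)

-- ===== PRECONDITION & SPEC =====
def Spec_generateUnionSubgraph (edgeList : List (Int × Int)) (nodes : List Int) (out : (List (Int × Int)) × List Int) : Prop := out = generateUnionSubgraph_alt edgeList nodes
instance (edgeList : List (Int × Int)) (nodes : List Int) (out : (List (Int × Int)) × List Int) : Decidable (Spec_generateUnionSubgraph edgeList nodes out) := by unfold Spec_generateUnionSubgraph; infer_instance

-- ===== CLAIM =====
def Claim_equal_generateUnionSubgraph : Prop := ∀ (edgeList : List (Int × Int)) (nodes : List Int), Dom_generateUnionSubgraph edgeList nodes → Spec_generateUnionSubgraph edgeList nodes (generateUnionSubgraph edgeList nodes)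

-- ===== LEMMAS AND PROOFS =====

-- names for the three stages of B (definitionally the lets of the port)
def pvInc (edgeList : List (Int × Int)) : PySem.Dict Int (List Int) :=
  (PySem.List.enumerate edgeList 0).foldl
    (fun d p =>
      if p.2.1 != p.2.2 then
        (PySem.Dict.modify d p.2.1 [] (· ++ [p.1])).modify p.2.2 [] (· ++ [p.1])
      else d)
    PySem.Dict.empty

def pvPostings (edgeList : List (Int × Int)) : List (Int × Int) :=
  (PySem.List.enumerate edgeList 0).flatMap
    (fun p => if p.2.1 != p.2.2 then [(p.2.1, p.1), (p.2.2, p.1)] else [])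

def pvHit (edgeList : List (Int × Int)) (nodes : List Int) : PySem.Set Int :=
  nodes.foldl (fun s node => ((pvInc edgeList).getD node []).foldl PySem.Set.add s) PySem.Set.empty

-- the index-building fold is the one-posting-at-a-time fold over pvPostings
theorem pvInc_eq_fold (edgeList : List (Int × Int)) :
    pvInc edgeList
      = (pvPostings edgeList).foldl (fun d p => PySem.Dict.modify d p.1 [] (· ++ [p.2])) PySem.Dict.empty := by
  have aux : ∀ (l : List (Int × (Int × Int))) (d : PySem.Dict Int (List Int)),
      l.foldl
        (fun d p =>
          if p.2.1 != p.2.2 then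
            (PySem.Dict.modify d p.2.1 [] (· ++ [p.1])).modify p.2.2 [] (· ++ [p.1])
          else d) d
      = (l.flatMap (fun p => if p.2.1 != p.2.2 then [(p.2.1, p.1), (p.2.2, p.1)] else [])).foldl
          (fun d p => PySem.Dict.modify d p.1 [] (· ++ [p.2])) d := by
    intro l
    induction l with
    | nil => intro d; simp
    | cons p ps ih =>
      intro d
      simp only [List.foldl_cons, List.flatMap_cons]
      by_cases h : p.2.1 ≠ p.2.2
      · rw [if_pos (by simpa using h), if_pos (by simpa using h)]
        simp only [List.foldl_append, List.foldl_cons, List.foldl_nil]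
        exact ih _
      · rw [if_neg (by simpa using h), if_neg (by simpa using h)]
        simp only [List.nil_append]
        exact ih _
  exact aux _ _

theorem pvInc_getD (edgeList : List (Int × Int)) (x : Int) :
    (pvInc edgeList).getD x []
      = ((pvPostings edgeList).filter (fun p => p.1 == x)).map (·.2) := by
  rw [pvInc_eq_fold, PySem.Dict.getD_foldl_modify_append]
  simp

theorem pv_mem_postings (edgeList : List (Int × Int)) (x i : Int) :
    (x, i) ∈ pvPostings edgeList
      ↔ ∃ (k : Nat) (_ : k < edgeList.length),
          i = (k : Int) ∧ edgeList[k].1 ≠ edgeList[k].2 ∧ (x = edgeList[k].1 ∨ x = edgeList[k].2) := by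
  unfold pvPostings
  rw [List.mem_flatMap]
  constructor
  · rintro ⟨p, hp, hmem⟩
    obtain ⟨k, hk, rfl⟩ := (PySem.List.mem_enumerate_iff _ _ _).mp hp
    by_cases h : edgeList[k].1 ≠ edgeList[k].2
    · rw [if_pos (by simpa using h)] at hmem
      simp only [List.mem_cons, List.not_mem_nil, or_false] at hmem
      rcases hmem with h1 | h1 <;>
        exact ⟨k, hk, by simpa using congrArg Prod.snd h1,
               h, by first
                 | exact Or.inl (by simpa using congrArg Prod.fst h1)
                 | exact Or.inr (by simpa using congrArg Prod.fst h1)⟩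
    · rw [if_neg (by simpa using h)] at hmem
      cases hmem
  · rintro ⟨k, hk, rfl, hne, hx⟩
    refine ⟨((0 : Int) + k, edgeList[k]), (PySem.List.mem_enumerate_iff _ _ _).mpr ⟨k, hk, rfl⟩, ?_⟩
    rw [if_pos (by simpa using hne)]
    simp only [zero_add]
    rcases hx with h | h <;> simp [h]

theorem pv_mem_getD (edgeList : List (Int × Int)) (x i : Int) :
    i ∈ (pvInc edgeList).getD x [] ↔ (x, i) ∈ pvPostings edgeList := by
  rw [pvInc_getD]
  simp only [List.mem_map, List.mem_filter]
  constructor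
  · rintro ⟨p, ⟨hp, hx⟩, rfl⟩
    have : p = (x, p.2) := by
      have := eq_of_beq hx; exact Prod.ext this rfl
    rwa [← this]
  · intro h
    exact ⟨(x, i), ⟨h, by simp⟩, rfl⟩

theorem pv_mem_hit (edgeList : List (Int × Int)) (nodes : List Int) (i : Int) :
    i ∈ pvHit edgeList nodes ↔ ∃ n ∈ nodes, i ∈ (pvInc edgeList).getD n [] := by
  unfold pvHit
  have aux : ∀ (ns : List Int) (s0 : PySem.Set Int),
      i ∈ ns.foldl (fun s node => ((pvInc edgeList).getD node []).foldl PySem.Set.add s) s0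
        ↔ i ∈ s0 ∨ ∃ n ∈ ns, i ∈ (pvInc edgeList).getD n [] := by
    intro ns
    induction ns with
    | nil => simp
    | cons n ns ih =>
        intro s0
        simp only [List.foldl_cons, ih]
        rw [PySem.Set.mem_foldl_add (f := fun (b : Int) => b)]
        constructor
        · rintro (⟨h | ⟨b, hb, rfl⟩⟩ | ⟨m, hm, h⟩)
          · exact Or.inl h
          · exact Or.inr ⟨n, List.mem_cons_self, hb⟩
          · exact Or.inr ⟨m, List.mem_cons_of_mem _ hm, h⟩
        · rintro (h | ⟨m, hm, h⟩)
          · exact Or.inl (Or.inl h)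
          · rcases List.mem_cons.mp hm with rfl | hm
            · exact Or.inl (Or.inr ⟨i, h, rfl⟩)
            · exact Or.inr ⟨m, hm, h⟩
  rw [aux]
  simp [PySem.Set.empty]

theorem pv_hit_iff (edgeList : List (Int × Int)) (nodes : List Int) (i : Int) :
    i ∈ pvHit edgeList nodes
      ↔ ∃ (k : Nat) (_ : k < edgeList.length),
          i = (k : Int) ∧ edgeList[k].1 ≠ edgeList[k].2
            ∧ (edgeList[k].1 ∈ nodes ∨ edgeList[k].2 ∈ nodes) := by
  rw [pv_mem_hit]
  constructor
  · rintro ⟨n, hn, h⟩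
    obtain ⟨k, hk, rfl, hne, hx⟩ := (pv_mem_postings edgeList n i).mp ((pv_mem_getD _ _ _).mp h)
    exact ⟨k, hk, rfl, hne, by rcases hx with h | h <;> [exact Or.inl (h ▸ hn); exact Or.inr (h ▸ hn)]⟩
  · rintro ⟨k, hk, rfl, hne, hx⟩
    rcases hx with h | h
    · exact ⟨edgeList[k].1, h, (pv_mem_getD _ _ _).mpr
        ((pv_mem_postings _ _ _).mpr ⟨k, hk, rfl, hne, Or.inl rfl⟩)⟩
    · exact ⟨edgeList[k].2, h, (pv_mem_getD _ _ _).mpr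
        ((pv_mem_postings _ _ _).mpr ⟨k, hk, rfl, hne, Or.inr rfl⟩)⟩

-- the inner `for node in nodes` loop of A, in closed form
theorem pvInner (a b : Int) (nodes : List Int) (E : PySem.Set (Int × Int)) (N : PySem.Set Int) :
    nodes.foldl
      (fun (st : PySem.Set (Int × Int) × PySem.Set Int) node =>
        if a == node || b == node then
          (PySem.Set.add st.1 (a, b), PySem.Set.add (PySem.Set.add st.2 a) b)
        else st)
      (E, N)
    = if a ∈ nodes ∨ b ∈ nodes then
        (PySem.Set.add E (a, b), PySem.Set.add (PySem.Set.add N a) b)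
      else (E, N) := by
  induction nodes generalizing E N with
  | nil => simp
  | cons n ns ih =>
      simp only [List.foldl_cons]
      by_cases h : a = n ∨ b = n
      · rw [if_pos (show (a == n || b == n) = true by simpa using h), ih]
        have hmem : a ∈ n :: ns ∨ b ∈ n :: ns := by
          rcases h with h | h <;> simp [h]
        rw [if_pos hmem]
        by_cases h2 : a ∈ ns ∨ b ∈ ns
        · rw [if_pos h2]
          have hE : (a, b) ∈ PySem.Set.add E (a, b) := by simp [PySem.Set.mem_add]
          have ha : a ∈ PySem.Set.add (PySem.Set.add N a) b := by simp [PySem.Set.mem_add]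
          have hb : b ∈ PySem.Set.add (PySem.Set.add N a) b := by simp [PySem.Set.mem_add]
          rw [PySem.Set.add_of_mem hE, PySem.Set.add_of_mem ha, PySem.Set.add_of_mem hb]
        · rw [if_neg h2]
      · rw [if_neg (show ¬((a == n || b == n) = true) by simp; tauto), ih]
        have hiff : (a ∈ n :: ns ∨ b ∈ n :: ns) ↔ (a ∈ ns ∨ b ∈ ns) := by
          simp only [List.mem_cons]; tauto
        rw [if_congr hiff rfl rfl]

-- A's outer loop equals B's emission loop, given the index-set characterisation
theorem pvMain (edgeList : List (Int × Int)) (nodes : List Int) :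
    ∀ (es : List (Int × Int)) (s : Int)
      (_ : ∀ p ∈ PySem.List.enumerate es s,
        (PySem.Set.contains (pvHit edgeList nodes) p.1 = true
          ↔ (p.2.1 ≠ p.2.2 ∧ (p.2.1 ∈ nodes ∨ p.2.2 ∈ nodes))))
      (st : PySem.Set (Int × Int) × PySem.Set Int),
    es.foldl
      (fun (st : PySem.Set (Int × Int) × PySem.Set Int) e =>
        if e.1 == e.2 then st
        else
          nodes.foldl
            (fun (st : PySem.Set (Int × Int) × PySem.Set Int) node =>
              if e.1 == node || e.2 == node then
                (PySem.Set.add st.1 (e.1, e.2), PySem.Set.add (PySem.Set.add st.2 e.1) e.2)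
              else st)
            st)
      st
    = (PySem.List.enumerate es s).foldl
        (fun (st : PySem.Set (Int × Int) × PySem.Set Int) p =>
          if PySem.Set.contains (pvHit edgeList nodes) p.1 then
            (PySem.Set.add st.1 (p.2.1, p.2.2), PySem.Set.add (PySem.Set.add st.2 p.2.1) p.2.2)
          else st)
        st := by
  intro es
  induction es with
  | nil => intro s _ st; simp [PySem.List.enumerate_nil]
  | cons e es ih =>
      intro s H st
      rw [PySem.List.enumerate_cons]
      simp only [List.foldl_cons]
      have hg := H (s, e) (by rw [PySem.List.enumerate_cons]; exact List.mem_cons_self)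
      have hstep :
          (if e.1 == e.2 then st
           else
             nodes.foldl
               (fun (st : PySem.Set (Int × Int) × PySem.Set Int) node =>
                 if e.1 == node || e.2 == node then
                   (PySem.Set.add st.1 (e.1, e.2), PySem.Set.add (PySem.Set.add st.2 e.1) e.2)
                 else st)
               st)
          = (if PySem.Set.contains (pvHit edgeList nodes) (s, e).1 then
               (PySem.Set.add st.1 ((s, e).2.1, (s, e).2.2),
                PySem.Set.add (PySem.Set.add st.2 (s, e).2.1) (s, e).2.2)
             else st) := by
        by_cases hd : e.1 = e.2
        · rw [if_pos (show (e.1 == e.2) = true by simpa using hd)]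
          rw [if_neg (by intro hc; exact (hg.mp hc).1 hd)]
        · rw [if_neg (show ¬((e.1 == e.2) = true) by simpa using hd)]
          obtain ⟨E, N⟩ := st
          rw [pvInner]
          by_cases hm : e.1 ∈ nodes ∨ e.2 ∈ nodes
          · rw [if_pos hm, if_pos (hg.mpr ⟨hd, hm⟩)]
          · rw [if_neg hm, if_neg (by intro hc; exact hm (hg.mp hc).2)]
      rw [hstep]
      exact ih (s + 1) (fun p hp => H p (by rw [PySem.List.enumerate_cons]; exact List.mem_cons_of_mem _ hp)) _

-- ===== VERDICT =====
theorem generateUnionSubgraph_spec : Claim_equal_generateUnionSubgraph := by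
  intro edgeList nodes _
  unfold Spec_generateUnionSubgraph generateUnionSubgraph generateUnionSubgraph_alt
  show _ = (_, _)
  have H : ∀ p ∈ PySem.List.enumerate edgeList 0,
      (PySem.Set.contains (pvHit edgeList nodes) p.1 = true
        ↔ (p.2.1 ≠ p.2.2 ∧ (p.2.1 ∈ nodes ∨ p.2.2 ∈ nodes))) := by
    intro p hp
    obtain ⟨k, hk, rfl⟩ := (PySem.List.mem_enumerate_iff _ _ _).mp hp
    rw [PySem.Set.contains_iff, pv_hit_iff]
    constructor
    · rintro ⟨k', hk', hkk, hne, hx⟩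
      have : k' = k := by omega
      subst this
      exact ⟨hne, hx⟩
    · rintro ⟨hne, hx⟩
      exact ⟨k, hk, by omega, hne, hx⟩
  have h := pvMain edgeList nodes edgeList 0 H (PySem.Set.empty, PySem.Set.empty)
  rw [h]
  rfl
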